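-- pv_equiv track=rewrite | github.com/cruzsbrian/desdemona | desdemona/othello.py | get_flips
-- ===== SOURCE A (Python) =====
-- def get_flips(pieces, piece_idx, move_idx, color):
--     flips = []
--     opp_after = []
--     can_flip_before = False
--     can_flip_after = True
--
--     for i in range(len(pieces)):
--         if piece_idx[i] < move_idx:
--             if pieces[i] == color:
--                 flips = []
--                 can_flip_before = True
--             if pieces[i] == 0:
--                 flips = []
--                 can_flip_before = False
--             if pieces[i] == color * -1 and can_flip_before:
--                 flips.append(piece_idx[i])
--
--         if piece_idx[i] > move_idx:
--             if pieces[i] == color: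
--                 flips += opp_after
--                 break
--             if pieces[i] == color * -1 and can_flip_after:
--                 opp_after.append(piece_idx[i])
--             if pieces[i] == 0:
--                 break
--
--     return flips
-- ===== SOURCE B (Python) =====
-- def get_flips(pieces, piece_idx, move_idx, color):
--     pairs = list(zip(pieces, piece_idx))
--     # index of the first pair that terminates the scan (own color or empty on the far side)
--     stop = next((k for k, (p, idx) in enumerate(pairs)
--                  if idx > move_idx and (p == color or p == 0)), len(pairs))
--     prefix = pairs[:stop]
--     # flips on the near side: running candidate list, reset/enabled by own color, cleared by empty
--     before = []
--     enabled = False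
--     for p, idx in prefix:
--         if idx < move_idx:
--             if p == color:
--                 before = []
--                 enabled = True
--             if p == 0:
--                 before = []
--                 enabled = False
--             if p == -color and enabled:
--                 before.append(idx)
--     # opponents on the far side count only if the terminator is own color
--     if stop < len(pairs) and pairs[stop][0] == color:
--         return before + [idx for p, idx in prefix if idx > move_idx and p == -color]
--     return before
-- ===== Notes on version B (the rewrite author's own statement) =====
-- stated objective: alternative
-- what changed: Replaces A's single stateful index loop with an early break by a decomposition: first locate the terminating far-side piece (own color or empty) with a search, then compute the near-side flips by a fold over the prefix and the far-side flips by a filter, concatenating them only when the terminator is own color.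
import Mathlib
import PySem

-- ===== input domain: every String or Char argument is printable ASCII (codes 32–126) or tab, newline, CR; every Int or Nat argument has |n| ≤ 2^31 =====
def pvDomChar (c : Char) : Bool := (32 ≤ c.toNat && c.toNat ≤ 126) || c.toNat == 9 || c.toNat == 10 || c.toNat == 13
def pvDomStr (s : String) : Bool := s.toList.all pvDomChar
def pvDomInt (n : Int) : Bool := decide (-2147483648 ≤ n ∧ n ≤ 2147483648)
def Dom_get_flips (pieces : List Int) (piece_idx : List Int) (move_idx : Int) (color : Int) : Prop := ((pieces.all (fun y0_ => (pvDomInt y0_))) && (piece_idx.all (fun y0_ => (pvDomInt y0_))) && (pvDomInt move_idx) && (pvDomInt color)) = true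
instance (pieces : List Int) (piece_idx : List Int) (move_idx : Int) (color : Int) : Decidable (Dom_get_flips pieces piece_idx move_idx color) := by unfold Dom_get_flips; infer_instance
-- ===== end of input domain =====

-- B re-derives the flips by locating the terminating far-side piece first, then a fold (near side)
-- plus a filter (far side), instead of A's single stateful loop with an early break (objective: alternative).


-- ===== PORT A =====
-- literal transliteration of A's for-loop over range(len(pieces)) with its break,
-- as a fueled index recursion over the same state (flips, opp_after, can_flip_before, can_flip_after)
def getFlipsLoop (pieces : List Int) (piece_idx : List Int) (move_idx : Int) (color : Int) :
    Nat → Nat → List Int → List Int → Bool → Bool → List Int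
  | 0, _, flips, _, _, _ => flips
  | fuel + 1, i, flips, opp, cfb, cfa =>
    match PySem.List.pyGet? piece_idx (i : Int), PySem.List.pyGet? pieces (i : Int) with
    | some idx, some p =>
      let st1 :=
        if idx < move_idx then
          let stA := if p == color then (([] : List Int), true) else (flips, cfb)
          let stB := if p == 0 then (([] : List Int), false) else stA
          if p == color * -1 && stB.2 then (stB.1 ++ [idx], stB.2) else stB
        else (flips, cfb)
      if idx > move_idx then
        if p == color then st1.1 ++ opp
        else
          let opp' := if p == color * -1 && cfa then opp ++ [idx] else opp
          if p == 0 then st1.1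
          else getFlipsLoop pieces piece_idx move_idx color fuel (i + 1) st1.1 opp' st1.2 cfa
      else getFlipsLoop pieces piece_idx move_idx color fuel (i + 1) st1.1 opp st1.2 cfa
    | _, _ => flips  -- IndexError (piece_idx[i] out of range); excluded by Pre_get_flips

def get_flips (pieces : List Int) (piece_idx : List Int) (move_idx : Int) (color : Int) : List Int :=
  getFlipsLoop pieces piece_idx move_idx color pieces.length 0 [] [] false true

-- ===== PORT B =====
-- does this pair terminate the far-side scan (own color or empty beyond the move)?
def stopCond (move_idx : Int) (color : Int) (q : Int × Int) : Bool :=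
  decide (q.2 > move_idx) && (q.1 == color || q.1 == 0)

-- one step of B's near-side loop (reset/enable on own color, clear on empty, append opponents)
def beforeStep (move_idx : Int) (color : Int) (st : List Int × Bool) (q : Int × Int) : List Int × Bool :=
  if q.2 < move_idx then
    let stA := if q.1 == color then (([] : List Int), true) else st
    let stB := if q.1 == 0 then (([] : List Int), false) else stA
    if q.1 == -color && stB.2 then (stB.1 ++ [q.2], stB.2) else stB
  else st

def get_flips_alt (pieces : List Int) (piece_idx : List Int) (move_idx : Int) (color : Int) : List Int :=
  let pairs := pieces.zip piece_idx
  let stop := (pairs.findIdx? (stopCond move_idx color)).getD pairs.length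
  let pref := pairs.take stop
  let before := (pref.foldl (beforeStep move_idx color) ([], false)).1
  if h : stop < pairs.length then
    if (pairs[stop]).1 == color then
      before ++ (pref.filter (fun q => decide (q.2 > move_idx) && q.1 == -color)).map Prod.snd
    else before
  else before

-- ===== PRECONDITION & SPEC =====
-- Pre_ excludes exactly the inputs on which A raises IndexError: pieces longer than piece_idx
-- with no terminating far-side pair reached before the missing index; it excludes no input on
-- which A returns.
def Pre_get_flips (pieces : List Int) (piece_idx : List Int) (move_idx : Int) (color : Int) : Prop :=
  pieces.length ≤ piece_idx.length ∨
    ((pieces.zip piece_idx).any (stopCond move_idx color)) = true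
instance (pieces : List Int) (piece_idx : List Int) (move_idx : Int) (color : Int) : Decidable (Pre_get_flips pieces piece_idx move_idx color) := by unfold Pre_get_flips; infer_instance

def pvWitness_get_flips : List Int × List Int × Int × Int := ([1, -1, -1, 1], [0, 1, 3, 4], 2, 1)

def Spec_get_flips (pieces : List Int) (piece_idx : List Int) (move_idx : Int) (color : Int) (out : List Int) : Prop := out = get_flips_alt pieces piece_idx move_idx color
instance (pieces : List Int) (piece_idx : List Int) (move_idx : Int) (color : Int) (out : List Int) : Decidable (Spec_get_flips pieces piece_idx move_idx color out) := by unfold Spec_get_flips; infer_instance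

-- ===== CLAIM (what is proved, stated in full; the proofs are below) =====
def Claim_equal_get_flips : Prop := ∀ (pieces : List Int) (piece_idx : List Int) (move_idx : Int) (color : Int), Dom_get_flips pieces piece_idx move_idx color → Pre_get_flips pieces piece_idx move_idx color → Spec_get_flips pieces piece_idx move_idx color (get_flips pieces piece_idx move_idx color)

-- ===== LEMMAS AND PROOFS =====

-- reference loop: A's loop read off the zipped pair list (can_flip_after is constantly true in A)
def refLoop (move_idx : Int) (color : Int) : List (Int × Int) → List Int → List Int → Bool → List Int
  | [], flips, _, _ => flips
  | q :: rest, flips, opp, cfb =>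
    let st1 := beforeStep move_idx color (flips, cfb) q
    if q.2 > move_idx then
      if q.1 == color then st1.1 ++ opp
      else
        let opp' := if q.1 == -color then opp ++ [q.2] else opp
        if q.1 == 0 then st1.1
        else refLoop move_idx color rest st1.1 opp' st1.2
    else refLoop move_idx color rest st1.1 opp st1.2

-- the far-side opponents collected from a pair list
def afterOpps (move_idx : Int) (color : Int) (l : List (Int × Int)) : List Int :=
  (l.filter (fun q => decide (q.2 > move_idx) && q.1 == -color)).map Prod.snd

theorem beforeStep_not_lt (move_idx color : Int) (st : List Int × Bool) (q : Int × Int)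
    (h : ¬ q.2 < move_idx) : beforeStep move_idx color st q = st := by
  simp [beforeStep, h]

theorem afterOpps_nil (move_idx color : Int) : afterOpps move_idx color [] = [] := rfl

theorem afterOpps_cons (move_idx color : Int) (q : Int × Int) (l : List (Int × Int)) :
    afterOpps move_idx color (q :: l)
      = (if (decide (q.2 > move_idx) && q.1 == -color) = true then [q.2] else [])
          ++ afterOpps move_idx color l := by
  simp only [afterOpps, List.filter_cons]
  split <;> simp

theorem loop_eq_ref (pieces piece_idx : List Int) (move_idx color : Int) :
    ∀ (fuel i : Nat) (flips opp : List Int) (cfb : Bool),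
    i + fuel = pieces.length →
    (pieces.length ≤ piece_idx.length ∨ ((pieces.zip piece_idx).drop i).any (stopCond move_idx color) = true) →
    getFlipsLoop pieces piece_idx move_idx color fuel i flips opp cfb true
      = refLoop move_idx color ((pieces.zip piece_idx).drop i) flips opp cfb := by
  intro fuel
  induction fuel with
  | zero =>
    intro i flips opp cfb hlen _
    have hz : (pieces.zip piece_idx).length ≤ i := by
      simp only [List.length_zip]; omega
    rw [List.drop_eq_nil_of_le hz]
    simp [getFlipsLoop, refLoop]
  | succ fuel ih =>
    intro i flips opp cfb hlen hpre
    have hip : i < pieces.length := by omega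
    have hiz : i < (pieces.zip piece_idx).length := by
      rcases hpre with h | h
      · simp only [List.length_zip]; omega
      · by_contra hc
        rw [List.drop_eq_nil_of_le (by omega)] at h
        simp at h
    have hii : i < piece_idx.length := by
      simp only [List.length_zip] at hiz; omega
    have hdrop : (pieces.zip piece_idx).drop i
        = (pieces[i], piece_idx[i]) :: (pieces.zip piece_idx).drop (i + 1) := by
      rw [List.drop_eq_getElem_cons hiz, List.getElem_zip]
    have hg1 : PySem.List.pyGet? piece_idx (i : Int) = some piece_idx[i] := by
      rw [PySem.List.pyGet?_natCast, List.getElem?_eq_getElem hii]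
    have hg2 : PySem.List.pyGet? pieces (i : Int) = some pieces[i] := by
      rw [PySem.List.pyGet?_natCast, List.getElem?_eq_getElem hip]
    have hrec : stopCond move_idx color (pieces[i], piece_idx[i]) = false →
        ∀ (flips' opp' : List Int) (cfb' : Bool),
        getFlipsLoop pieces piece_idx move_idx color fuel (i + 1) flips' opp' cfb' true
          = refLoop move_idx color ((pieces.zip piece_idx).drop (i + 1)) flips' opp' cfb' := by
      intro hsf flips' opp' cfb'
      rcases hpre with h | h
      · exact ih (i + 1) flips' opp' cfb' (by omega) (Or.inl h)
      · rw [hdrop] at h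
        simp only [List.any_cons, hsf, Bool.false_or] at h
        exact ih (i + 1) flips' opp' cfb' (by omega) (Or.inr h)
    rw [hdrop]
    simp only [getFlipsLoop, hg1, hg2, refLoop, beforeStep, mul_neg_one, Bool.and_true]
    by_cases h2 : piece_idx[i] > move_idx
    · have hnlt : ¬ piece_idx[i] < move_idx := by omega
      simp only [if_pos h2, if_neg hnlt]
      by_cases hc : (pieces[i] == color) = true
      · simp only [hc, if_true]
      · simp only [if_neg hc]
        by_cases h0 : (pieces[i] == 0) = true
        · simp only [h0, if_true]
        · simp only [if_neg h0]
          exact hrec (by simp [stopCond, hc, h0]) _ _ _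
    · simp only [if_neg h2]
      exact hrec (by simp [stopCond, h2]) _ _ _

theorem ref_eq_split (move_idx color : Int) :
    ∀ (l : List (Int × Int)) (flips opp : List Int) (cfb : Bool),
    refLoop move_idx color l flips opp cfb =
      match l.findIdx? (stopCond move_idx color) with
      | none => (l.foldl (beforeStep move_idx color) (flips, cfb)).1
      | some k =>
        if (l.getD k (0, 0)).1 == color then
          ((l.take k).foldl (beforeStep move_idx color) (flips, cfb)).1
            ++ (opp ++ afterOpps move_idx color (l.take k))
        else ((l.take k).foldl (beforeStep move_idx color) (flips, cfb)).1 := by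
  intro l
  induction l with
  | nil => intro flips opp cfb; simp [refLoop, List.findIdx?_nil]
  | cons q rest ih =>
    intro flips opp cfb
    by_cases hs : stopCond move_idx color q = true
    · -- the head terminates the scan
      have h2 : q.2 > move_idx := by
        simp only [stopCond, Bool.and_eq_true, decide_eq_true_eq] at hs
        exact hs.1
      have hst : beforeStep move_idx color (flips, cfb) q = (flips, cfb) :=
        beforeStep_not_lt _ _ _ _ (by omega)
      rw [List.findIdx?_cons, if_pos hs]
      simp only [refLoop, hst, if_pos h2, List.getD_cons_zero, List.take_zero,
        List.foldl_nil, afterOpps_nil, List.append_nil]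
      by_cases hc : (q.1 == color) = true
      · simp [hc]
      · have h0 : (q.1 == 0) = true := by
          simp only [stopCond, Bool.and_eq_true, Bool.or_eq_true] at hs
          rcases hs.2 with h | h
          · exact absurd h hc
          · exact h
        simp [hc, h0]
    · -- the head does not terminate the scan
      have hsf : stopCond move_idx color q = false := by
        simpa using hs
      rw [List.findIdx?_cons, if_neg (by simp [hsf])]
      by_cases h2 : q.2 > move_idx
      · have hd2 : decide (q.2 > move_idx) = true := by simpa using h2
        have hco : (q.1 == color) = false ∧ (q.1 == 0) = false := by
          simp only [stopCond, hd2, Bool.true_and] at hsf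
          simpa using hsf
        have hst : beforeStep move_idx color (flips, cfb) q = (flips, cfb) :=
          beforeStep_not_lt _ _ _ _ (by omega)
        simp only [refLoop, hst, if_pos h2, hco.1, hco.2, Bool.false_eq_true, if_false]
        rw [ih]
        cases hr : rest.findIdx? (stopCond move_idx color) with
        | none =>
          simp only [Option.map_none, List.foldl_cons, hst]
        | some k =>
          simp only [Option.map_some, List.getD_cons_succ, List.take_succ_cons,
            List.foldl_cons, hst, afterOpps_cons, hd2, Bool.true_and]
          by_cases hopp : (q.1 == -color) = true
          · simp only [hopp, if_true]
            split <;> simp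
          · simp only [if_neg hopp]
            split <;> simp
      · have hd2 : decide (q.2 > move_idx) = false := by simpa using h2
        simp only [refLoop, if_neg h2]
        rw [ih]
        cases hr : rest.findIdx? (stopCond move_idx color) with
        | none =>
          simp only [Option.map_none, List.foldl_cons]
        | some k =>
          simp only [Option.map_some, List.getD_cons_succ, List.take_succ_cons,
            List.foldl_cons, afterOpps_cons, hd2, Bool.false_and, Bool.false_eq_true,
            if_false, List.nil_append]

-- ===== VERDICT (by name: the statement is the Claim_ definition above) =====
theorem get_flips_spec : Claim_equal_get_flips := by
  intro pieces piece_idx move_idx color _ hpre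
  unfold Spec_get_flips
  have h1 : get_flips pieces piece_idx move_idx color
      = refLoop move_idx color (pieces.zip piece_idx) [] [] false := by
    have := loop_eq_ref pieces piece_idx move_idx color pieces.length 0 [] [] false
      (by omega) (by exact hpre)
    simpa [get_flips, List.drop_zero] using this
  rw [h1, ref_eq_split]
  unfold get_flips_alt afterOpps
  cases hf : (pieces.zip piece_idx).findIdx? (stopCond move_idx color) with
  | none =>
    simp only [hf, Option.getD_none]
    rw [dif_neg (by omega), List.take_length]
  | some k =>
    have hk : k < (pieces.zip piece_idx).length :=
      (List.findIdx?_eq_some_iff_findIdx_eq.mp hf).1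
    simp only [hf, Option.getD_some]
    rw [dif_pos hk, List.getD_eq_getElem _ _ hk]
    split <;> simp
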